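-- pv_equiv track=rewrite | github.com/fr0m-scratch/CAD-Validator | utility/utility.py | abbrev_match
-- ===== SOURCE A (Python) =====
-- def abbrev_match(abr, ori, threshold = 1000):
--     i,j, count = 0, 0, 0
--     while i < len(abr) and j < len(ori):
--         if abr[i] == ori[j]:
--             i += 1
--             j += 1
--         else:
--             j += 1
--             count += 1
--     count += len(ori) - j
--     if count >= threshold:
--         return False
--     if i == len(abr):
--         return True
--     elif j == len(ori):
--         return False
-- ===== SOURCE B (Python) =====
-- def abbrev_match(abr, ori, threshold=1000):
--     # Match abr against ori RIGHT-TO-LEFT: for each abbreviation character, jump to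
--     # its last occurrence below the current bound via str.rfind.  Such a backward
--     # match exists iff abr is a subsequence of ori, and then the number of skipped
--     # characters is exactly len(ori) - len(abr).
--     i = len(ori)
--     for ch in reversed(abr):
--         i = ori.rfind(ch, 0, i)
--         if i < 0:
--             return False
--     return len(ori) - len(abr) < threshold
-- ===== Notes on version B (the rewrite author's own statement) =====
-- stated objective: alternative
-- what changed: Replaces A's left-to-right two-pointer scan with an accumulated skip counter by a right-to-left match that jumps to the last occurrence of each abbreviation character via str.rfind with a shrinking upper bound, plus the closed-form skip count len(ori)-len(abr); backward last-occurrence matching succeeds iff abr is a subsequence of ori.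
import Mathlib
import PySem

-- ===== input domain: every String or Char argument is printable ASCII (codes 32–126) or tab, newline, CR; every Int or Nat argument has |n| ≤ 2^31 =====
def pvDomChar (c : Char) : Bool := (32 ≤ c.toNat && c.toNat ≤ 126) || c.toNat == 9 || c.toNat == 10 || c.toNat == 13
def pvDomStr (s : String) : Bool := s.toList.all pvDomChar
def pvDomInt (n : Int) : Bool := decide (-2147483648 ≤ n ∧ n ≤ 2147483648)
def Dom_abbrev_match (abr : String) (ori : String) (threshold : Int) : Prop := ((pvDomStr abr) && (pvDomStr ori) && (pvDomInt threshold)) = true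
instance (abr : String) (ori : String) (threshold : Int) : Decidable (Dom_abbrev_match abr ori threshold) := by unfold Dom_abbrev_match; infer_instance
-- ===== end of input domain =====

-- B replaces A's left-to-right two-pointer scan with an accumulated skip counter by a
-- right-to-left match that jumps to the last occurrence of each abbreviation character
-- (str.rfind with a shrinking bound) plus the closed-form skip count len(ori)-len(abr)
-- (alternative decomposition, same result).

-- ===== PORT A =====
-- A's while loop over indices i (into abr), j (into ori) and count, as the obvious structural
-- recursion: the two list arguments are the suffixes abr[i:], ori[j:]; state (i, j, count) is
-- carried exactly as in the Python.
def pvLoopA : List Char → List Char → Int → Int → Int → Int × Int × Int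
  | a :: as, o :: os, i, j, count =>
      if a == o then pvLoopA as os (i+1) (j+1) count
      else pvLoopA (a :: as) os i (j+1) (count+1)
  | _, _, i, j, count => (i, j, count)

def abbrev_match (abr : String) (ori : String) (threshold : Int) : Bool :=
  let la : Int := abr.toList.length
  let lo : Int := ori.toList.length
  let r := pvLoopA abr.toList ori.toList 0 0 0
  let count := r.2.2 + (lo - r.2.1)
  if count ≥ threshold then false
  else if r.1 == la then true
  else if r.2.1 == lo then false
  else false  -- unreachable: the loop only exits with i = la or j = lo (Python would return None here)

-- ===== PORT B =====
-- s.rfind(c, 0, hi) = pvRfind (s.take hi) c, where pvRfind gives the LAST index of c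
-- (none = Python's -1); exact for 0 ≤ hi ≤ len(s), which the loop maintains.
def pvRfind : List Char → Char → Option Nat
  | [], _ => none
  | x :: xs, c =>
      match pvRfind xs c with
      | some k => some (k + 1)
      | none => if x == c then some 0 else none

-- B's for-loop over reversed(abr), carrying the current upper bound i (a Nat: it starts at
-- len(ori) and afterwards is always an index rfind returned; the 'i < 0' branch is `none`).
def pvLoopB : List Char → List Char → Nat → Bool
  | [], _, _ => true
  | c :: cs, ori, hi =>
      match pvRfind (ori.take hi) c with
      | none => false
      | some k => pvLoopB cs ori k

def abbrev_match_alt (abr : String) (ori : String) (threshold : Int) : Bool :=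
  let la : Int := abr.toList.length
  let lo : Int := ori.toList.length
  if pvLoopB abr.toList.reverse ori.toList ori.toList.length then
    decide (lo - la < threshold)
  else false

-- ===== PRECONDITION & SPEC =====
def Spec_abbrev_match (abr : String) (ori : String) (threshold : Int) (out : Bool) : Prop := out = abbrev_match_alt abr ori threshold
instance (abr : String) (ori : String) (threshold : Int) (out : Bool) : Decidable (Spec_abbrev_match abr ori threshold out) := by unfold Spec_abbrev_match; infer_instance

-- ===== CLAIM (what is proved, stated in full; the proofs are below) =====
def Claim_equal_abbrev_match : Prop := ∀ (abr : String) (ori : String) (threshold : Int), Dom_abbrev_match abr ori threshold → Spec_abbrev_match abr ori threshold (abbrev_match abr ori threshold)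

-- ===== LEMMAS AND PROOFS =====

-- greedy (forward) match length: how much of abr A's loop matches
def pvG : List Char → List Char → Nat
  | a :: as, o :: os => if a == o then pvG as os + 1 else pvG (a :: as) os
  | _, _ => 0

theorem pvG_nil_left (ori : List Char) : pvG [] ori = 0 := by
  cases ori <;> rfl

theorem pvG_nil_right (abr : List Char) : pvG abr [] = 0 := by
  cases abr <;> rfl

theorem pvLoopA_spec : ∀ (ori abr : List Char) (i j c : Int), ∃ t : Int,
    pvLoopA abr ori i j c = (i + pvG abr ori, j + t, c + (t - pvG abr ori)) := by
  intro ori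
  induction ori with
  | nil =>
    intro abr i j c
    refine ⟨0, ?_⟩
    cases abr <;> simp [pvLoopA, pvG_nil_right]
  | cons o os ih =>
    intro abr i j c
    cases abr with
    | nil => exact ⟨0, by simp [pvLoopA, pvG_nil_left]⟩
    | cons a as =>
      by_cases h : (a == o) = true
      · obtain ⟨t, ht⟩ := ih as (i+1) (j+1) c
        refine ⟨t + 1, ?_⟩
        have step : pvLoopA (a :: as) (o :: os) i j c = pvLoopA as os (i+1) (j+1) c := by
          simp [pvLoopA, h]
        have hg : (pvG (a :: as) (o :: os) : Int) = (pvG as os : Int) + 1 := by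
          simp [pvG, h]
        rw [step, ht, hg]
        exact congrArg₂ Prod.mk (by ring) (congrArg₂ Prod.mk (by ring) (by ring))
      · obtain ⟨t, ht⟩ := ih (a :: as) i (j+1) (c+1)
        refine ⟨t + 1, ?_⟩
        have step : pvLoopA (a :: as) (o :: os) i j c = pvLoopA (a :: as) os i (j+1) (c+1) := by
          simp [pvLoopA, h]
        have hg : pvG (a :: as) (o :: os) = pvG (a :: as) os := by
          simp [pvG, h]
        rw [step, ht, hg]
        exact congrArg₂ Prod.mk (by ring) (congrArg₂ Prod.mk (by ring) (by ring))

-- forward greedy correctness: pvG matches all of abr iff abr is a sublist (subsequence) of ori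
theorem pvG_full_iff_sublist : ∀ (ori abr : List Char),
    pvG abr ori = abr.length ↔ abr.Sublist ori := by
  intro ori
  induction ori with
  | nil =>
    intro abr
    cases abr with
    | nil => simp [pvG]
    | cons a as => simp [pvG_nil_right]
  | cons o os ih =>
    intro abr
    cases abr with
    | nil => simp [pvG_nil_left]
    | cons a as =>
      by_cases h : (a == o) = true
      · have e : a = o := by simpa using h
        subst e
        have hg : pvG (a :: as) (a :: os) = pvG as os + 1 := by simp [pvG]
        rw [hg]
        constructor
        · intro hl
          exact List.Sublist.cons₂ a ((ih as).mp (by simpa using hl))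
        · intro hs
          have := (ih as).mpr (List.cons_sublist_cons.mp hs)
          simp [this]
      · have hg : pvG (a :: as) (o :: os) = pvG (a :: as) os := by simp [pvG, h]
        rw [hg]
        constructor
        · intro hl
          exact List.Sublist.cons o ((ih (a :: as)).mp hl)
        · intro hs
          refine (ih (a :: as)).mpr ?_
          cases hs with
          | cons _ hs' => exact hs'
          | cons₂ => simp at h

-- pvRfind returns an in-range index
theorem pvRfind_lt : ∀ (s : List Char) (c : Char) (k : Nat),
    pvRfind s c = some k → k < s.length := by
  intro s
  induction s with
  | nil => intro c k h; simp [pvRfind] at h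
  | cons x xs ih =>
    intro c k h
    simp only [pvRfind] at h
    cases hr : pvRfind xs c with
    | some m =>
      rw [hr] at h
      have : k = m + 1 := by simpa using h.symm
      subst this
      have := ih c m hr
      simp; omega
    | none =>
      rw [hr] at h
      by_cases hx : (x == c) = true
      · simp [hx] at h; subst h; simp
      · simp [hx] at h

-- forward consumption of a single character (the iterator step), for the proof only
def pvConsume : List Char → Char → Option (List Char)
  | [], _ => none
  | o :: os, c => if o == c then some os else pvConsume os c

theorem pvConsume_append (l1 l2 : List Char) (c : Char) :
    pvConsume (l1 ++ l2) c =
      match pvConsume l1 c with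
      | some r => some (r ++ l2)
      | none => pvConsume l2 c := by
  induction l1 with
  | nil => simp [pvConsume]
  | cons x xs ih =>
    by_cases h : (x == c) = true
    · simp [pvConsume, h]
    · simp [pvConsume, h, ih]

-- bridge: consuming c from s.reverse = jumping to the last occurrence of c in s
theorem pvConsume_reverse (s : List Char) (c : Char) :
    pvConsume s.reverse c = (pvRfind s c).map (fun k => (s.take k).reverse) := by
  induction s with
  | nil => simp [pvConsume, pvRfind]
  | cons x xs ih =>
    have hrev : (x :: xs).reverse = xs.reverse ++ [x] := by simp
    rw [hrev, pvConsume_append, ih]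
    cases hr : pvRfind xs c with
    | some k =>
      simp only [pvRfind, hr, Option.map_some, List.take_succ_cons]
      simp
    | none =>
      by_cases hx : (x == c) = true
      · simp [pvRfind, hr, pvConsume, hx]
      · simp [pvRfind, hr, pvConsume, hx]

-- forward greedy over a list (all(c in it …)), for the proof only
def pvAllIn : List Char → List Char → Bool
  | [], _ => true
  | c :: cs, it =>
      match pvConsume it c with
      | none => false
      | some it' => pvAllIn cs it'

-- B's backward loop = forward greedy over the reversed prefix
theorem pvLoopB_eq_allIn : ∀ (cs ori : List Char) (hi : Nat), hi ≤ ori.length →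
    pvLoopB cs ori hi = pvAllIn cs (ori.take hi).reverse := by
  intro cs
  induction cs with
  | nil => intro ori hi _; rfl
  | cons c cs ih =>
    intro ori hi hle
    simp only [pvLoopB, pvAllIn, pvConsume_reverse]
    cases hr : pvRfind (ori.take hi) c with
    | none => rfl
    | some k =>
      have hk : k < (ori.take hi).length := pvRfind_lt _ _ _ hr
      have hk' : k ≤ ori.length := by simp at hk; omega
      have htt : (ori.take hi).take k = ori.take k := by
        rw [List.take_take]
        congr 1
        simp at hk
        omega
      simp only [Option.map_some, htt]
      exact ih ori k hk'

-- forward greedy correctness for pvAllIn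
theorem pvAllIn_iff_sublist : ∀ (it cs : List Char),
    pvAllIn cs it = true ↔ cs.Sublist it := by
  intro it
  induction it with
  | nil =>
    intro cs
    cases cs with
    | nil => simp [pvAllIn]
    | cons c cs' => simp [pvAllIn, pvConsume]
  | cons o os ih =>
    intro cs
    cases cs with
    | nil => simp [pvAllIn]
    | cons c cs' =>
      by_cases h : (o == c) = true
      · have e : o = c := by simpa using h
        subst e
        have h1 : pvAllIn (o :: cs') (o :: os) = pvAllIn cs' os := by
          simp [pvAllIn, pvConsume]
        rw [h1, ih cs']
        exact ⟨fun hs => List.Sublist.cons₂ o hs, fun hs => List.cons_sublist_cons.mp hs⟩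
      · have h1 : pvAllIn (c :: cs') (o :: os) = pvAllIn (c :: cs') os := by
          simp [pvAllIn, pvConsume, h]
        rw [h1, ih (c :: cs')]
        constructor
        · intro hs; exact List.Sublist.cons o hs
        · intro hs
          cases hs with
          | cons _ hs' => exact hs'
          | cons₂ => simp at h

-- B's loop succeeds iff abr is a subsequence of ori
theorem pvLoopB_iff_sublist (abr ori : List Char) :
    pvLoopB abr.reverse ori ori.length = true ↔ abr.Sublist ori := by
  rw [pvLoopB_eq_allIn abr.reverse ori ori.length (le_refl _), List.take_length,
      pvAllIn_iff_sublist]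
  exact List.reverse_sublist

-- ===== VERDICT (by name: the statement is the Claim_ definition above) =====
theorem abbrev_match_spec : Claim_equal_abbrev_match := by
  intro abr ori threshold _
  unfold Spec_abbrev_match abbrev_match abbrev_match_alt
  obtain ⟨t, ht⟩ := pvLoopA_spec ori.toList abr.toList 0 0 0
  simp only [ht]
  by_cases hsub : abr.toList.Sublist ori.toList
  · have hB : pvLoopB abr.toList.reverse ori.toList ori.toList.length = true :=
      (pvLoopB_iff_sublist _ _).mpr hsub
    have hg : (pvG abr.toList ori.toList : Int) = (abr.toList.length : Int) := by
      exact_mod_cast (pvG_full_iff_sublist _ _).mpr hsub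
    simp only [hB, hg, if_true, zero_add, beq_self_eq_true]
    split_ifs with h1
    · symm; simp only [decide_eq_false_iff_not]; omega
    · symm; simp only [decide_eq_true_eq]; omega
  · have hB : pvLoopB abr.toList.reverse ori.toList ori.toList.length = false := by
      rw [Bool.eq_false_iff]
      exact fun h => hsub ((pvLoopB_iff_sublist _ _).mp h)
    have hg : pvG abr.toList ori.toList ≠ abr.toList.length :=
      fun e => hsub ((pvG_full_iff_sublist _ _).mp e)
    have hne : (((pvG abr.toList ori.toList : Int)) == (abr.toList.length : Int)) = false := by
      simp only [beq_eq_false_iff_ne, ne_eq]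
      exact_mod_cast hg
    simp only [hB, zero_add, hne, Bool.false_eq_true, if_false]
    split_ifs <;> rfl
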